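-- pv_equiv track=rewrite | github.com/jayabhavana342/Checkers-RESTAPI | production/vagrant/app/app.py | checkEast
-- ===== SOURCE A (Python) =====
-- def checkEast(x, y, original, data, counter):
--     if counter == 0:
--         return True
--     if y == -1:
--         return False
--     else:
--         try:
--             return checkEast(x, y + 1, original, data, counter - 1) and data[x][y] == original
--         except IndexError:
--             return False
-- ===== SOURCE B (Python) =====
-- def checkEast(x, y, original, data, counter):
--     for i in range(counter):
--         yi = y + i
--         if yi == -1:
--             return False
--         try:
--             if data[x][yi] != original:
--                 return False
--         except IndexError:
--             return False
--     return True
-- ===== Notes on version B (the rewrite author's own statement) =====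
-- stated objective: simpler
-- what changed: Replaced the counter-deep recursion (which checks cells on the way back up through an 'and' chain and a per-level try/except) with a single flat west-to-east loop over range(counter) that early-returns on the sentinel, an IndexError or a mismatch.
-- outside the precondition, e.g. on checkEast(0, -5, 0, [[]], -1): A returns False, B returns True; on checkEast(0, 0, 0, [[]], 20000): A raises RecursionError, B returns False
import Mathlib
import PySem

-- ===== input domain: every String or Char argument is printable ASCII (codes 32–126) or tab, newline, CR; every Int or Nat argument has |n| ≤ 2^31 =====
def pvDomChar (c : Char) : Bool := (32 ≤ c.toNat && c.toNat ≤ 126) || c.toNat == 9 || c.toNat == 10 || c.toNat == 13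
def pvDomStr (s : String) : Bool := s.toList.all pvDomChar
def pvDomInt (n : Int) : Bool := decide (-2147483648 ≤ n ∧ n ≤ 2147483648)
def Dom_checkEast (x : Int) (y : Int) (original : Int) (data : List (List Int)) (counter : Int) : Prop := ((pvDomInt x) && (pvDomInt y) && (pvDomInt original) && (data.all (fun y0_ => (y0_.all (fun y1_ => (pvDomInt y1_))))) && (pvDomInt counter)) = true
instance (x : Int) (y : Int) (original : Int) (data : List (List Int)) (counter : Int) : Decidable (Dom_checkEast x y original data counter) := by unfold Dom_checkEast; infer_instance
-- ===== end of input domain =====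

-- ===== PORT A =====
-- B replaces A's counter-deep recursion by a flat loop (simpler, O(1) space; same asymptotic time).
-- Recursion of A ported on the Nat fuel counter.toNat; for counter < 0 Python A never returns
-- normally (RecursionError, or an accidental sentinel False when y < -1), excluded by Pre_checkEast.
def checkEastAux (x : Int) (original : Int) (data : List (List Int)) (y : Int) : Nat → Bool
  | 0 => true
  | Nat.succ n =>
    if y = -1 then false
    else
      (checkEastAux x original data (y + 1) n) &&
      (match (PySem.List.pyGet? data x).bind (fun row => PySem.List.pyGet? row y) with
       | none => false          -- IndexError → except → False
       | some v => v == original)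

def checkEast (x : Int) (y : Int) (original : Int) (data : List (List Int)) (counter : Int) : Bool :=
  checkEastAux x original data y counter.toNat

-- ===== PORT B =====
def checkEast_alt (x : Int) (y : Int) (original : Int) (data : List (List Int)) (counter : Int) : Bool :=
  (PySem.List.pyRange 0 counter 1).all fun i =>
    (y + i != -1) &&
    (match (PySem.List.pyGet? data x).bind (fun row => PySem.List.pyGet? row (y + i)) with
     | none => false            -- IndexError → except → False
     | some v => v == original)

-- ===== PRECONDITION & SPEC =====
-- Pre_ excludes (a) counter < 0, a degenerate count on which Python A never does useful work: it
-- recurses past the interpreter's recursion limit (RecursionError) when y ≥ -1, and when y < -1 it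
-- returns an accidental False manufactured by the y == -1 sentinel reached from below, while B's
-- empty loop naturally returns True — a corner no caller specifies; and (b) inputs whose recursion
-- depth (counter calls, cut short after -1 - y calls by the sentinel when y < -1) reaches 9900,
-- where A overflows the interpreter's recursion stack and raises RecursionError (the check harness
-- runs CPython with a recursion limit of 10000; 9900 leaves headroom for the harness's own frames)
-- while the iterative B still returns.
def Pre_checkEast (x : Int) (y : Int) (original : Int) (data : List (List Int)) (counter : Int) : Prop :=
  0 ≤ counter ∧ (counter < 9900 ∨ (y < -1 ∧ -1 - y < 9900))
instance (x : Int) (y : Int) (original : Int) (data : List (List Int)) (counter : Int) : Decidable (Pre_checkEast x y original data counter) := by unfold Pre_checkEast; infer_instance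

def pvWitness_checkEast : Int × Int × Int × List (List Int) × Int := (0, 0, 5, [[5, 5, 3]], 2)

def Spec_checkEast (x : Int) (y : Int) (original : Int) (data : List (List Int)) (counter : Int) (out : Bool) : Prop := out = checkEast_alt x y original data counter
instance (x : Int) (y : Int) (original : Int) (data : List (List Int)) (counter : Int) (out : Bool) : Decidable (Spec_checkEast x y original data counter out) := by unfold Spec_checkEast; infer_instance

-- ===== CLAIM (what is proved, stated in full; the proofs are below) =====
def Claim_equal_checkEast : Prop := ∀ (x : Int) (y : Int) (original : Int) (data : List (List Int)) (counter : Int), Dom_checkEast x y original data counter → Pre_checkEast x y original data counter → Spec_checkEast x y original data counter (checkEast x y original data counter)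

-- ===== LEMMAS AND PROOFS =====
-- the per-cell check both ports share as an expression
def pvCell (x original : Int) (data : List (List Int)) (t : Int) : Bool :=
  match (PySem.List.pyGet? data x).bind (fun row => PySem.List.pyGet? row t) with
  | none => false
  | some v => v == original

theorem checkEastAux_eq_all (x original : Int) (data : List (List Int)) :
    ∀ (n : Nat) (y : Int),
      checkEastAux x original data y n
        = (List.range n).all (fun k => (y + (k : Int) != -1) && pvCell x original data (y + (k : Int))) := by
  intro n
  induction n with
  | zero => intro y; simp [checkEastAux]
  | succ n ih =>
    intro y
    rw [List.range_succ_eq_map]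
    simp only [List.all_cons, List.all_map]
    by_cases hy : y = -1
    · subst hy; simp [checkEastAux, pvCell]
    · simp only [checkEastAux, if_neg hy, ih (y + 1)]
      have h0 : y + ((0 : Nat) : Int) = y := by simp
      have hhead : (y + ((0 : Nat) : Int) != -1) = true := by
        rw [h0]; simpa [bne_iff_ne] using hy
      rw [hhead, Bool.true_and, h0, Bool.and_comm]
      have hfun : (fun k : Nat => ((y + 1 + (k : Int) != -1) && pvCell x original data (y + 1 + (k : Int))))
          = ((fun k : Nat => ((y + (k : Int) != -1) && pvCell x original data (y + (k : Int)))) ∘ Nat.succ) := by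
        funext k
        have hk : y + 1 + (k : Int) = y + ((Nat.succ k : Nat) : Int) := by push_cast; ring
        simp only [Function.comp_apply, hk]
      rw [hfun]
      rfl

theorem alt_eq_all (x y original : Int) (data : List (List Int)) (counter : Int) :
    checkEast_alt x y original data counter
      = (List.range counter.toNat).all (fun k => (y + (k : Int) != -1) && pvCell x original data (y + (k : Int))) := by
  unfold checkEast_alt
  rw [PySem.List.pyRange_one]
  simp only [Int.sub_zero, List.all_map, Int.zero_add]
  rfl

-- ===== VERDICT (by name: the statement is the Claim_ definition above) =====
theorem checkEast_spec : Claim_equal_checkEast := by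
  intro x y original data counter _ _
  unfold Spec_checkEast checkEast
  rw [checkEastAux_eq_all, alt_eq_all]
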